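-- pv_equiv track=rewrite | github.com/emanuxd11/FP-feup | pg7/pairsofdicks.py | complete_pairs
-- ===== SOURCE A (Python) =====
-- def complete_pairs(s1, s2):
--     alpha = set("abcdefghijklmnopqrstuvwxyz")
--     result = set()
--     for string1 in s1:
--         for string2 in s2:
--             if set(string1 + string2) == alpha:
--                 result.add(string1 + string2)
--     return result
-- ===== SOURCE B (Python) =====
-- def complete_pairs(s1, s2):
--     FULL = (1 << 26) - 1
--
--     def mask(s):
--         m = 0
--         for ch in s:
--             k = ord(ch) - 97
--             if not (0 <= k < 26):
--                 return None
--             m |= 1 << k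
--         return m
--
--     masks2 = [mask(t) for t in s2]
--     compat = {}  # memo: s1-mask -> list of s2 strings completing it, in s2 order
--     result = set()
--     for u in s1:
--         m = mask(u)
--         if m is None:
--             continue
--         if m not in compat:
--             compat[m] = [t for t, mt in zip(s2, masks2)
--                          if mt is not None and m | mt == FULL]
--         for t in compat[m]:
--             result.add(u + t)
--     return result
-- ===== Notes on version B (the rewrite author's own statement) =====
-- stated objective: faster
-- what changed: B works in stages: it precomputes 26-bit letter masks for all of s2, then for each s1 string memoizes in a dict keyed by its mask the list of s2 strings that complete it (computed once per distinct mask by a filter pass), and finally emits concatenations from that cached list, so the per-pair set-building and even the per-pair test for duplicate-mask s1 strings disappear.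
import Mathlib
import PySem

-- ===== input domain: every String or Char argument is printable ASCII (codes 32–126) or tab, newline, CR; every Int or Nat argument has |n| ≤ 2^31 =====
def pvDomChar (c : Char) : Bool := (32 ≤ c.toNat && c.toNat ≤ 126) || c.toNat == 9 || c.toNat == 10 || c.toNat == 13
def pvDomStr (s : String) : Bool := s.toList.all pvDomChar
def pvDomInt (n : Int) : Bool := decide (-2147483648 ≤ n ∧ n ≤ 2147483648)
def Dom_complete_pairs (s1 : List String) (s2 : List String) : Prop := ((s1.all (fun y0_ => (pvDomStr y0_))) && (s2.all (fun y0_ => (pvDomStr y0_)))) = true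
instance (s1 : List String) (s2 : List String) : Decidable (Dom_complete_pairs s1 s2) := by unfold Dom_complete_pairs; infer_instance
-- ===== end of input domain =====

-- B stages the work: letter masks for s2 up front, a memo dict from each distinct s1 mask to the
-- list of s2 strings completing it (one filter pass per distinct mask), then emission from the
-- cached lists — replacing A's per-pair set construction and comparison (objective: faster).

-- ===== PORT A =====
-- alpha = set("abcdefghijklmnopqrstuvwxyz")
def pvAlpha : PySem.Set Char := PySem.Set.ofList "abcdefghijklmnopqrstuvwxyz".toList

def complete_pairs (s1 : List String) (s2 : List String) : List String :=
  s1.foldl (fun result string1 =>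
    s2.foldl (fun result string2 =>
      if PySem.Set.equal (PySem.Set.ofList (string1 ++ string2).toList) pvAlpha
      then PySem.Set.add result (string1 ++ string2) else result) result)
    PySem.Set.empty

-- ===== PORT B =====
-- one step of mask(s)'s loop: k = ord(ch) - 97; bail out (None) unless 0 <= k < 26, else set bit k
def pvMaskStep (acc : Option Nat) (ch : Char) : Option Nat :=
  match acc with
  | none => none
  | some m =>
    let k : Int := (ch.toNat : Int) - 97
    if 0 ≤ k ∧ k < 26 then some (m ||| (1 <<< k.toNat)) else none

def pvMask (s : String) : Option Nat := s.toList.foldl pvMaskStep (some 0)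

-- the list comprehension  [t for t, mt in zip(s2, masks2) if mt is not None and m | mt == FULL]
def pvCompat (m : Nat) (s2 : List String) (masks2 : List (Option Nat)) : List String :=
  ((s2.zip masks2).filter (fun p =>
    match p.2 with
    | some mt => decide (m ||| mt = (1 <<< 26) - 1)
    | none => false)).map Prod.fst

def complete_pairs_alt (s1 : List String) (s2 : List String) : List String :=
  let masks2 := s2.map pvMask
  (s1.foldl (fun st u =>
    match pvMask u with
    | none => st
    | some m =>
      let compat := if st.1.contains m then st.1 else st.1.insert m (pvCompat m s2 masks2)
      (compat, (compat.getD m []).foldl (fun r t => PySem.Set.add r (u ++ t)) st.2))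
    ((PySem.Dict.empty : PySem.Dict Nat (List String)), PySem.Set.empty)).2

-- ===== PRECONDITION & SPEC =====
def Spec_complete_pairs (s1 : List String) (s2 : List String) (out : List String) : Prop := out = complete_pairs_alt s1 s2
instance (s1 : List String) (s2 : List String) (out : List String) : Decidable (Spec_complete_pairs s1 s2 out) := by unfold Spec_complete_pairs; infer_instance

-- ===== CLAIM (what is proved, stated in full; the proofs are below) =====
def Claim_equal_complete_pairs : Prop := ∀ (s1 : List String) (s2 : List String), Dom_complete_pairs s1 s2 → Spec_complete_pairs s1 s2 (complete_pairs s1 s2)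

-- ===== LEMMAS AND PROOFS =====

def isLb (c : Char) : Bool := 97 ≤ c.toNat && c.toNat ≤ 122
def bitOf (c : Char) : Nat := 1 <<< (c.toNat - 97)
def alphaLit : List Char := ['a','b','c','d','e','f','g','h','i','j','k','l','m','n','o','p','q','r','s','t','u','v','w','x','y','z']

lemma alpha_eq : pvAlpha = alphaLit := rfl

lemma alpha_bounds : ∀ a ∈ alphaLit, 97 ≤ a.toNat ∧ a.toNat ≤ 122 := by simp [alphaLit]

lemma alpha_index : ∀ i < 26, (alphaLit.any (fun a => a.toNat - 97 == i)) = true := by decide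

lemma char_eq_of_toNat {c d : Char} (h : c.toNat = d.toNat) : c = d :=
  Char.ext (UInt32.toNat_inj.mp h)

lemma mem_alpha_of_isL {c : Char} (h1 : 97 ≤ c.toNat) (h2 : c.toNat ≤ 122) : c ∈ alphaLit := by
  obtain ⟨a, ha, hb⟩ := List.any_eq_true.mp (alpha_index (c.toNat - 97) (by omega))
  obtain ⟨hb1, hb2⟩ := alpha_bounds a ha
  have : a.toNat - 97 = c.toNat - 97 := by simpa using hb
  have : a = c := char_eq_of_toNat (by omega)
  exact this ▸ ha

lemma maskStep_none (cs : List Char) : cs.foldl pvMaskStep none = none := by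
  induction cs <;> simp [pvMaskStep, *]

lemma maskStep_some (cs : List Char) (m : Nat) :
    cs.foldl pvMaskStep (some m) =
      if cs.all isLb then some (cs.foldl (fun m c => m ||| bitOf c) m) else none := by
  induction cs generalizing m with
  | nil => simp
  | cons c cs ih =>
    by_cases h : isLb c = true
    · have h1 : 97 ≤ c.toNat ∧ c.toNat ≤ 122 := by simpa [isLb] using h
      have hstep : pvMaskStep (some m) c = some (m ||| bitOf c) := by
        simp only [pvMaskStep, bitOf]
        rw [if_pos (by constructor <;> omega)]
        rw [show ((c.toNat : Int) - 97).toNat = c.toNat - 97 by omega]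
      simp [List.foldl_cons, hstep, ih, h]
    · have hstep : pvMaskStep (some m) c = none := by
        simp only [pvMaskStep]
        rw [if_neg]
        simp [isLb] at h
        omega
      simp [List.foldl_cons, hstep, maskStep_none, h]

lemma orFold_acc (cs : List Char) (m : Nat) :
    cs.foldl (fun m c => m ||| bitOf c) m = m ||| cs.foldl (fun m c => m ||| bitOf c) 0 := by
  induction cs generalizing m with
  | nil => simp
  | cons c cs ih =>
    simp only [List.foldl_cons]
    rw [ih (m ||| bitOf c), ih (0 ||| bitOf c)]
    simp [Nat.or_assoc]

lemma testBit_orFold (cs : List Char) (m : Nat) (i : Nat) :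
    (cs.foldl (fun m c => m ||| bitOf c) m).testBit i
      = (m.testBit i || cs.any (fun c => c.toNat - 97 == i)) := by
  induction cs generalizing m with
  | nil => simp
  | cons c cs ih =>
    simp only [List.foldl_cons, List.any_cons, ih, Nat.testBit_or]
    have : (bitOf c).testBit i = (c.toNat - 97 == i) := by
      rw [Bool.eq_iff_iff]
      simp [bitOf, Nat.one_shiftLeft, Nat.testBit_two_pow]
    rw [this, Bool.or_assoc]

lemma full_eq : (1 <<< 26) - 1 = 2 ^ 26 - 1 := by norm_num [Nat.one_shiftLeft]

lemma mval_full_iff (cs : List Char) (hall : ∀ c ∈ cs, 97 ≤ c.toNat ∧ c.toNat ≤ 122) :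
    cs.foldl (fun m c => m ||| bitOf c) 0 = (1 <<< 26) - 1 ↔ ∀ a ∈ alphaLit, a ∈ cs := by
  constructor
  · intro h a ha
    obtain ⟨h1, h2⟩ := alpha_bounds a ha
    have hi : (cs.foldl (fun m c => m ||| bitOf c) 0).testBit (a.toNat - 97) = true := by
      rw [h, full_eq, Nat.testBit_two_pow_sub_one]
      simp; omega
    rw [testBit_orFold, Nat.zero_testBit, Bool.false_or] at hi
    obtain ⟨c, hc, he⟩ := List.any_eq_true.mp hi
    have hcb := hall c hc
    have : c = a := char_eq_of_toNat (by simp only [beq_iff_eq] at he; omega)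
    exact this ▸ hc
  · intro h
    apply Nat.eq_of_testBit_eq
    intro i
    rw [full_eq, Nat.testBit_two_pow_sub_one, testBit_orFold, Nat.zero_testBit, Bool.false_or]
    by_cases hi : i < 26
    · simp only [hi, decide_true]
      obtain ⟨a, ha, hb⟩ := List.any_eq_true.mp (alpha_index i hi)
      exact List.any_eq_true.mpr ⟨a, h a ha, hb⟩
    · simp only [hi, decide_false]
      rw [List.any_eq_false]
      intro c hc
      have := hall c hc
      simp only [beq_iff_eq]
      omega

lemma condA_iff (cs : List Char) :
    PySem.Set.equal (PySem.Set.ofList cs) pvAlpha = true ↔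
      cs.foldl pvMaskStep (some 0) = some ((1 <<< 26) - 1) := by
  rw [PySem.Set.equal_iff, maskStep_some]
  by_cases hall : cs.all isLb = true
  · have hb : ∀ c ∈ cs, 97 ≤ c.toNat ∧ c.toNat ≤ 122 := by
      intro c hc
      have := List.all_eq_true.mp hall c hc
      simpa [isLb] using this
    simp only [hall, if_true, Option.some_inj]
    rw [mval_full_iff cs hb]
    constructor
    · intro h a ha
      exact (h a).mpr (by rw [alpha_eq]; exact ha) |> (by simpa [PySem.Set.mem_ofList] using ·)
    · intro h x
      rw [PySem.Set.mem_ofList, alpha_eq]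
      constructor
      · intro hx
        obtain ⟨h1, h2⟩ := hb x hx
        exact mem_alpha_of_isL h1 h2
      · exact h x
  · simp only [hall]
    constructor
    · intro h
      exfalso
      simp only [List.all_eq_true, not_forall] at hall
      obtain ⟨c, hc, hne⟩ := hall
      have : c ∈ pvAlpha := (h c).mp (by simpa [PySem.Set.mem_ofList] using hc)
      rw [alpha_eq] at this
      have := alpha_bounds c this
      simp [isLb] at hne
      omega
    · intro h
      exact absurd h (by simp)

lemma condA_eq (u t : String) :
    (PySem.Set.equal (PySem.Set.ofList (u ++ t).toList) pvAlpha) =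
      (match pvMask u, pvMask t with
       | some a, some b => decide (a ||| b = (1 <<< 26) - 1)
       | _, _ => false) := by
  rw [String.toList_append]
  have h := condA_iff (u.toList ++ t.toList)
  rw [List.foldl_append] at h
  cases hu : pvMask u with
  | none =>
    rw [pvMask] at hu
    rw [hu, maskStep_none] at h
    simp only []
    rw [Bool.eq_false_iff]
    intro hT
    exact absurd (h.mp hT) (by simp)
  | some mu =>
    rw [pvMask] at hu
    rw [hu] at h
    cases ht : pvMask t with
    | none =>
      rw [pvMask, maskStep_some] at ht
      by_cases hta : t.toList.all isLb = true
      · simp [hta] at ht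
      · rw [maskStep_some, if_neg (by simp [hta])] at h
        simp only []
        rw [Bool.eq_false_iff]
        intro hT
        exact absurd (h.mp hT) (by simp)
    | some mt =>
      rw [pvMask, maskStep_some] at ht
      by_cases hta : t.toList.all isLb = true
      · rw [if_pos hta, Option.some_inj] at ht
        rw [maskStep_some, if_pos hta, orFold_acc, ht] at h
        simp only []
        rw [Bool.eq_iff_iff, h, Option.some_inj, decide_eq_true_eq]
      · simp [hta] at ht

-- A's inner loop does nothing for an s1 string containing a non-letter
lemma inner_none (u : String) (hu : pvMask u = none) (s2 : List String) (r : List String) :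
    s2.foldl (fun result string2 =>
      if PySem.Set.equal (PySem.Set.ofList (u ++ string2).toList) pvAlpha
      then PySem.Set.add result (u ++ string2) else result) r = r := by
  induction s2 generalizing r with
  | nil => rfl
  | cons t s2 ih =>
    simp only [List.foldl_cons, condA_eq u t, hu]
    exact ih r

-- A's inner loop = emission from the filtered compatibility list
lemma inner_compat (u : String) (mu : Nat) (hu : pvMask u = some mu) (s2 : List String) (r : List String) :
    s2.foldl (fun result string2 =>
      if PySem.Set.equal (PySem.Set.ofList (u ++ string2).toList) pvAlpha
      then PySem.Set.add result (u ++ string2) else result) r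
    = (pvCompat mu s2 (s2.map pvMask)).foldl (fun r t => PySem.Set.add r (u ++ t)) r := by
  induction s2 generalizing r with
  | nil => rfl
  | cons t s2 ih =>
    simp only [List.foldl_cons, condA_eq u t, hu, pvCompat, List.map_cons, List.zip_cons_cons,
      List.filter_cons]
    cases ht : pvMask t with
    | none => simpa [pvCompat] using ih r
    | some mt =>
      by_cases hc : mu ||| mt = (1 <<< 26) - 1
      · simp only [hc, decide_true, if_true, List.map_cons, List.foldl_cons]
        simpa [pvCompat] using ih _
      · simp only [hc, decide_false]
        simpa [pvCompat] using ih r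

-- memo-cache invariant: every cached entry is the compatibility list of its key
def CacheOK (s2 : List String) (c : PySem.Dict Nat (List String)) : Prop :=
  ∀ k, c.contains k = true → c.getD k [] = pvCompat k s2 (s2.map pvMask)

lemma outer_loop (s2 : List String) (s1 : List String) (c : PySem.Dict Nat (List String))
    (r : List String) (hc : CacheOK s2 c) :
    s1.foldl (fun result string1 =>
      s2.foldl (fun result string2 =>
        if PySem.Set.equal (PySem.Set.ofList (string1 ++ string2).toList) pvAlpha
        then PySem.Set.add result (string1 ++ string2) else result) result) r
    = (s1.foldl (fun st u =>
        match pvMask u with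
        | none => st
        | some m =>
          let compat := if st.1.contains m then st.1 else st.1.insert m (pvCompat m s2 (s2.map pvMask))
          (compat, (compat.getD m []).foldl (fun r t => PySem.Set.add r (u ++ t)) st.2))
        (c, r)).2 := by
  induction s1 generalizing c r with
  | nil => rfl
  | cons u s1 ih =>
    simp only [List.foldl_cons]
    cases hu : pvMask u with
    | none =>
      rw [inner_none u hu s2 r]
      exact ih c r hc
    | some mu =>
      rw [inner_compat u mu hu s2 r]
      simp only []
      by_cases hm : c.contains mu = true
      · rw [if_pos hm, hc mu hm]
        exact ih c _ hc
      · rw [if_neg hm, PySem.Dict.getD_insert_self]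
        refine ih _ _ ?_
        intro k hk
        rw [PySem.Dict.getD_insert]
        by_cases hkm : k = mu
        · rw [if_pos hkm, hkm]
        · rw [if_neg hkm]
          rw [PySem.Dict.contains_insert, Bool.or_eq_true] at hk
          rcases hk with h1 | h1
          · exact absurd (eq_of_beq h1) hkm
          · exact hc k h1

-- ===== VERDICT (by name: the statement is the Claim_ definition above) =====
theorem complete_pairs_spec : Claim_equal_complete_pairs := by
  intro s1 s2 _
  unfold Spec_complete_pairs complete_pairs complete_pairs_alt
  exact outer_loop s2 s1 PySem.Dict.empty PySem.Set.empty (fun k hk => absurd hk (by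
    rw [PySem.Dict.contains_empty]; simp))
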